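-- pv_equiv track=rewrite | github.com/Soffira/Exam_step | data.py | get
-- ===== SOURCE A (Python) =====
-- userss = {
--     '1': {
--         'username': 'van',
--         'email': 'vanbyvan@fmail.ru',
--         'department': 'production',
--         'date_joined': '2011-11-11T11:10:09'
--     },
--     '2': {
--         'username': 'billy',
--         'email ': 'billyjeans@fmail.ru',
--         'department': 'pr',
--         'date_joined': '1983-03-02T12:12:53'
--     },
--     '3': {
--         'username': 'max',
--         'email ': 'maximus@fmail.ru',
--         'department': 'production',
--         'date_joined': '1999-05-29T14:14:28'
--     },
--     '4': {
--         'username': 'leonard',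
--         'email ': 'leokapri@fmail.ru',
--         'department': 'sales',
--         'date_joined': '1974-12-11T14:45:32'
--     }
-- }
--
-- def get(name=None, department=None):
--     inf1 = []
--     inf2 = []
--     if name == None:
--         for user in userss:
--             inf1.append(userss[user])
--     else:
--         for user in userss:
--             if name in userss[user]['username']:
--                 inf1.append(userss[user])
--     if department == None:
--         for user in userss:
--             inf2.append(userss[user])
--     else:
--         for user in userss:
--             if department in userss[user]['department']:
--                 inf2.append(userss[user])
--     inf3 = []
--     for i in inf1:
--         if i in inf2:
--             inf3.append(i)
--     return ('data: %s' % inf3)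
--
--     if name == None and department == None:
--         return ("Error: No id field provided. Please specify information")
-- ===== SOURCE B (Python) =====
-- userss = {
--     '1': {
--         'username': 'van',
--         'email': 'vanbyvan@fmail.ru',
--         'department': 'production',
--         'date_joined': '2011-11-11T11:10:09'
--     },
--     '2': {
--         'username': 'billy',
--         'email ': 'billyjeans@fmail.ru',
--         'department': 'pr',
--         'date_joined': '1983-03-02T12:12:53'
--     },
--     '3': {
--         'username': 'max',
--         'email ': 'maximus@fmail.ru',
--         'department': 'production',
--         'date_joined': '1999-05-29T14:14:28'
--     },
--     '4': {
--         'username': 'leonard',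
--         'email ': 'leokapri@fmail.ru',
--         'department': 'sales',
--         'date_joined': '1974-12-11T14:45:32'
--     }
-- }
--
-- def get(name=None, department=None):
--     result = []
--     for user in userss.values():
--         if (name is None or name in user['username']) and \
--            (department is None or department in user['department']):
--             result.append(user)
--     return 'data: %s' % result
-- ===== Notes on version B (the rewrite author's own statement) =====
-- stated objective: simpler
-- what changed: B replaces A's two separately filtered lists plus a quadratic list-membership intersection pass with a single loop over the users applying the combined name-and-department predicate.
import Mathlib
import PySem

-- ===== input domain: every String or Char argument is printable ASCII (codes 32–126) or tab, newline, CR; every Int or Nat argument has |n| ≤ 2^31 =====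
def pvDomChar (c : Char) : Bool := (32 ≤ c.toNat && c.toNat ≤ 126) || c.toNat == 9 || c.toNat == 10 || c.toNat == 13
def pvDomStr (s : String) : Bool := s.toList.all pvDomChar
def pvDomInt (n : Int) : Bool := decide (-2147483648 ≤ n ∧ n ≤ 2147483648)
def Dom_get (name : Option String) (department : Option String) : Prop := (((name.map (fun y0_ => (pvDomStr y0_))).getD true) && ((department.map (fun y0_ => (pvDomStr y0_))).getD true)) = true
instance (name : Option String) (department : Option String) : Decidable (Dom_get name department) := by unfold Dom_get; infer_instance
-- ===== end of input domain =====

-- B is simpler: one loop over the users with the combined name-and-department predicate,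
-- instead of A's two filtered lists followed by a quadratic membership intersection.

-- ===== PORT A =====
-- the fixed module-level dict `userss` (its values, in insertion order; keys '1'..'4' are never used)
def pvUserss : List (PySem.Dict String String) :=
  [ ⟨[("username", "van"), ("email", "vanbyvan@fmail.ru"), ("department", "production"), ("date_joined", "2011-11-11T11:10:09")]⟩,
    ⟨[("username", "billy"), ("email ", "billyjeans@fmail.ru"), ("department", "pr"), ("date_joined", "1983-03-02T12:12:53")]⟩,
    ⟨[("username", "max"), ("email ", "maximus@fmail.ru"), ("department", "production"), ("date_joined", "1999-05-29T14:14:28")]⟩,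
    ⟨[("username", "leonard"), ("email ", "leokapri@fmail.ru"), ("department", "sales"), ("date_joined", "1974-12-11T14:45:32")]⟩ ]

-- Python's repr of one user dict: '{' + "'k': 'v'" joined by ', ' + '}' (exact for this fixed
-- data: all keys/values are quote-free ASCII, so repr(s) = "'" + s + "'")
def pvReprUser (u : PySem.Dict String String) : String :=
  "{" ++ String.intercalate ", " (u.items.map (fun kv => "'" ++ kv.1 ++ "': '" ++ kv.2 ++ "'")) ++ "}"

-- Python's repr of a list of user dicts, as produced by '%s'
def pvReprList (l : List (PySem.Dict String String)) : String :=
  "[" ++ String.intercalate ", " (l.map pvReprUser) ++ "]"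

def get (name : Option String) (department : Option String) : String :=
  -- inf1: loop over userss appending, filtered by `name in username` when name is not None
  let inf1 : List (PySem.Dict String String) :=
    match name with
    | none => pvUserss.foldl (fun acc u => acc ++ [u]) []
    | some n => pvUserss.foldl (fun acc u => if PySem.Str.isIn n (u.getD "username" "") then acc ++ [u] else acc) []
  -- inf2: same for department
  let inf2 : List (PySem.Dict String String) :=
    match department with
    | none => pvUserss.foldl (fun acc u => acc ++ [u]) []
    | some d => pvUserss.foldl (fun acc u => if PySem.Str.isIn d (u.getD "department" "") then acc ++ [u] else acc) []
  -- inf3: for i in inf1: if i in inf2: inf3.append(i)  (dict equality = equality of the item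
  -- lists, exact here since all these dicts list their keys in the same order)
  let inf3 : List (PySem.Dict String String) :=
    inf1.foldl (fun acc i => if inf2.any (fun j => j.items == i.items) then acc ++ [i] else acc) []
  "data: " ++ pvReprList inf3

-- ===== PORT B =====
def get_alt (name : Option String) (department : Option String) : String :=
  let result : List (PySem.Dict String String) :=
    pvUserss.foldl (fun acc u =>
      if ((match name with
           | none => true
           | some n => PySem.Str.isIn n (u.getD "username" "")) &&
          (match department with
           | none => true
           | some d => PySem.Str.isIn d (u.getD "department" ""))) then acc ++ [u] else acc) []
  "data: " ++ pvReprList result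

-- ===== PRECONDITION & SPEC =====
def Spec_get (name : Option String) (department : Option String) (out : String) : Prop := out = get_alt name department
instance (name : Option String) (department : Option String) (out : String) : Decidable (Spec_get name department out) := by unfold Spec_get; infer_instance

-- ===== CLAIM (what is proved, stated in full; the proofs are below) =====
def Claim_equal_get : Prop := ∀ (name : Option String) (department : Option String), Dom_get name department → Spec_get name department (get name department)

-- ===== LEMMAS AND PROOFS =====

-- appending every element reproduces the list
theorem pv_foldl_append_all (l : List (PySem.Dict String String)) :
    l.foldl (fun acc u => acc ++ [u]) ([] : List (PySem.Dict String String)) = l := by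
  simpa using PySem.List.foldl_append_if (fun _ => true) id l []

-- the conditional-append loop is a filter
theorem pv_foldl_append_filter (p : PySem.Dict String String → Bool) (l : List (PySem.Dict String String)) :
    l.foldl (fun acc u => if p u then acc ++ [u] else acc) ([] : List (PySem.Dict String String)) = l.filter p := by
  simpa using PySem.List.foldl_append_if p id l []

-- a dict is determined by its item list
theorem pv_items_inj {u v : PySem.Dict String String} (h : u.items = v.items) : u = v := by
  cases u; cases v; simpa using h

-- membership of an element of l via item-list equality always succeeds
theorem pv_any_self {l : List (PySem.Dict String String)} {u : PySem.Dict String String}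
    (hu : u ∈ l) : (l.any (fun j => j.items == u.items)) = true := by
  simp only [List.any_eq_true]
  exact ⟨u, hu, by simp⟩

-- membership (via item-list equality) in a filter of l is, for u ∈ l, exactly the filter's test
theorem pv_any_filter (l : List (PySem.Dict String String)) (q : PySem.Dict String String → Bool)
    (u : PySem.Dict String String) (hu : u ∈ l) :
    ((l.filter q).any (fun j => j.items == u.items)) = q u := by
  cases hq : q u with
  | true =>
      simp only [List.any_eq_true, List.mem_filter]
      exact ⟨u, ⟨hu, hq⟩, by simp⟩
  | false =>
      simp only [List.any_eq_false, List.mem_filter]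
      rintro j ⟨-, hqj⟩ hbe
      have hj : j = u := pv_items_inj (by simpa using hbe)
      rw [hj] at hqj
      simp [hq] at hqj

-- ===== VERDICT (by name: the statement is the Claim_ definition above) =====
theorem get_spec : Claim_equal_get := by
  intro name department _
  unfold Spec_get _root_.get get_alt
  simp only [pv_foldl_append_all, pv_foldl_append_filter]
  rcases name with _ | n <;> rcases department with _ | d <;>
    refine congrArg (fun x => "data: " ++ pvReprList x) ?_
  · -- name = None, department = None
    rw [List.filter_congr (fun u hu => pv_any_self hu)]
    simp
  · -- name = None, department = some d
    rw [List.filter_congr (fun u hu =>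
      pv_any_filter pvUserss (fun u => PySem.Str.isIn d (u.getD "department" "")) u hu)]
    refine List.filter_congr (fun u _ => ?_)
    simp
  · -- name = some n, department = None
    rw [List.filter_congr (fun u hu => pv_any_self (List.mem_of_mem_filter hu)),
        List.filter_true]
    refine (List.filter_congr (fun u _ => ?_)).symm
    simp
  · -- name = some n, department = some d
    rw [List.filter_congr (fun u hu =>
      pv_any_filter pvUserss (fun u => PySem.Str.isIn d (u.getD "department" "")) u
        (List.mem_of_mem_filter hu)),
        List.filter_filter]
    refine List.filter_congr (fun u _ => ?_)
    simp [Bool.and_comm]
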